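-- pv_equiv track=rewrite | github.com/MrBrantCode/unitest_baseline | mut_generate/mist_train_cf/cf_22944/solution.py | max_pair_sum
-- ===== SOURCE A (Python) =====
-- def max_pair_sum(nums):
--     """
--     This function takes an array of integers as input and returns the maximum sum of two pairs of distinct positive integers in the array.
--
--     The integers in each pair should add up to a sum less than or equal to 100.
--
--     Parameters:
--     nums (list): A list of integers.
--
--     Returns:
--     int: The maximum sum of two pairs of distinct positive integers in the array.
--     """
--
--     # Filter out non-positive integers and sort the array in descending order
--     nums = sorted([num for num in nums if num > 0], reverse=True)
--
--     # Initialize variables to store the maximum pair sum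
--     max_sum = 0
--
--     # Iterate over the sorted array to find the maximum pair sum
--     for i in range(len(nums)):
--         for j in range(i + 1, len(nums)):
--             if nums[i] + nums[j] <= 100:
--                 max_sum = max(max_sum, nums[i] + nums[j])
--
--     return max_sum
-- ===== SOURCE B (Python) =====
-- def max_pair_sum(nums):
--     # Sort the positive values ascending, then scan with two pointers:
--     # the largest partner for xs[lo] is xs[hi]; if their sum fits, no pair
--     # with xs[lo] can beat it, otherwise xs[hi] fits with nothing.
--     xs = sorted(n for n in nums if n > 0)
--     best = 0
--     lo, hi = 0, len(xs) - 1
--     while lo < hi: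
--         s = xs[lo] + xs[hi]
--         if s <= 100:
--             best = max(best, s)
--             lo += 1
--         else:
--             hi -= 1
--     return best
-- ===== Notes on version B (the rewrite author's own statement) =====
-- stated objective: alternative
-- what changed: replaces A's quadratic scan over all index pairs with an ascending sort followed by a single two-pointer sweep that finds the best pair sum <= 100
import Mathlib
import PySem

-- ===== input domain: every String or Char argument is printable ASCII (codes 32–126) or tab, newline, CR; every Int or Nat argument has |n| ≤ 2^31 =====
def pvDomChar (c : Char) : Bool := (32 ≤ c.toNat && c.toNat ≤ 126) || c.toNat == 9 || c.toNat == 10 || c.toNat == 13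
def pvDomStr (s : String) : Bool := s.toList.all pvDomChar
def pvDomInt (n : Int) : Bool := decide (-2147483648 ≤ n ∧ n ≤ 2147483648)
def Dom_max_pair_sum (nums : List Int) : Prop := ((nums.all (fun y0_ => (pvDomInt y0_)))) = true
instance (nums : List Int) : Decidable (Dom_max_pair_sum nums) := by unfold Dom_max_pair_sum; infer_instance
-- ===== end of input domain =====

-- B replaces A's scan over all index pairs by an ascending sort plus a single
-- two-pointer sweep (objective: alternative algorithm).

-- ===== PORT A =====
def max_pair_sum (nums : List Int) : Int :=
  let l := PySem.List.sorted (nums.filter (fun num => decide (0 < num))) (fun x => x) true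
  (PySem.List.pyRange 0 (PySem.List.len l) 1).foldl (fun ms i =>
    (PySem.List.pyRange (i + 1) (PySem.List.len l) 1).foldl (fun ms j =>
      if PySem.List.pyGetD l i 0 + PySem.List.pyGetD l j 0 ≤ 100
      then max ms (PySem.List.pyGetD l i 0 + PySem.List.pyGetD l j 0)
      else ms) ms) 0

-- ===== PORT B =====
-- the 'while lo < hi' loop of B; 'fuel' only makes the recursion structural
-- (each step shrinks hi - lo by one, so fuel = xs.length is never exhausted)
def altGo (xs : List Int) : Nat → Nat → Nat → Int → Int
  | 0, _, _, best => best
  | fuel + 1, lo, hi, best =>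
    if lo < hi then
      let s := PySem.List.pyGetD xs (lo : Int) 0 + PySem.List.pyGetD xs (hi : Int) 0
      if s ≤ 100 then altGo xs fuel (lo + 1) hi (max best s)
      else altGo xs fuel lo (hi - 1) best
    else best

def max_pair_sum_alt (nums : List Int) : Int :=
  let xs := PySem.List.sorted (nums.filter (fun n => decide (0 < n))) (fun x => x) false
  altGo xs xs.length 0 (xs.length - 1) 0

-- ===== PRECONDITION & SPEC =====
def Spec_max_pair_sum (nums : List Int) (out : Int) : Prop := out = max_pair_sum_alt nums
instance (nums : List Int) (out : Int) : Decidable (Spec_max_pair_sum nums out) := by unfold Spec_max_pair_sum; infer_instance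

-- ===== CLAIM (what is proved, stated in full; the proofs are below) =====
def Claim_equal_max_pair_sum : Prop := ∀ (nums : List Int), Dom_max_pair_sum nums → Spec_max_pair_sum nums (max_pair_sum nums)

-- ===== LEMMAS AND PROOFS =====

-- proof-only helpers: the common value both programs compute is
-- 'max of 0 and the pair sums ≤ 100 of the positive elements' (= bsum)
def clip (s : Int) : Int := if s ≤ 100 then s else 0

def pairSums : List Int → List Int
  | [] => []
  | x :: r => r.map (fun e => x + e) ++ pairSums r

def sup0 (l : List Int) : Int := l.foldl max 0

def bsum (l : List Int) : Int := sup0 ((pairSums l).map clip)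

-- list-level reformulation of B's two-pointer loop (head + last of the remaining segment)
def tp : List Int → Int → Int
  | l, best =>
    if _h : 2 ≤ l.length then
      let x := l.getD 0 0
      let y := l.getD (l.length - 1) 0
      if x + y ≤ 100 then tp l.tail (max best (x + y))
      else tp l.dropLast best
    else best
termination_by l _ => l.length
decreasing_by
  · simp [List.length_tail]; omega
  · simp [List.length_dropLast]; omega

theorem sup0_nonneg (l : List Int) : 0 ≤ sup0 l := (PySem.List.le_foldl_max l 0).1

theorem foldl_max_max (l : List Int) (a b : Int) :
    l.foldl max (max a b) = max a (l.foldl max b) := by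
  induction l generalizing b with
  | nil => rfl
  | cons c t ih => simp only [List.foldl_cons, max_assoc, ih]

theorem sup0_append (l1 l2 : List Int) : sup0 (l1 ++ l2) = max (sup0 l1) (sup0 l2) := by
  have h0 : 0 ≤ l1.foldl max 0 := sup0_nonneg l1
  simp only [sup0, List.foldl_append]
  rw [show l1.foldl max 0 = max (l1.foldl max 0) 0 from (max_eq_left h0).symm, foldl_max_max,
    max_eq_left h0]

theorem sup0_perm {l1 l2 : List Int} (h : l1.Perm l2) : sup0 l1 = sup0 l2 := h.foldl_eq 0

theorem sup0_le {l : List Int} {M : Int} (h0 : 0 ≤ M) (hub : ∀ e ∈ l, e ≤ M) : sup0 l ≤ M := by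
  rcases PySem.List.foldl_max_mem l 0 with h | h
  · rw [sup0, h]; exact h0
  · exact hub _ h

theorem sup0_eq_of_max {l : List Int} {M : Int} (hM : M ∈ l) (hub : ∀ e ∈ l, e ≤ M)
    (h0 : 0 ≤ M) : sup0 l = M :=
  le_antisymm (sup0_le h0 hub) ((PySem.List.le_foldl_max l 0).2 M hM)

theorem bsum_nonneg (l : List Int) : 0 ≤ bsum l := sup0_nonneg _

theorem pairSums_append_singleton (d : List Int) (y : Int) :
    (pairSums (d ++ [y])).Perm (pairSums d ++ d.map (fun e => e + y)) := by
  induction d with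
  | nil => simp [pairSums]
  | cons a d' ih =>
    simp only [List.cons_append, pairSums, List.map_cons, List.map_append, List.map_nil]
    rw [← Multiset.coe_eq_coe] at ih ⊢
    simp only [← Multiset.coe_add, ← Multiset.cons_coe, ← Multiset.singleton_add] at ih ⊢
    rw [ih]
    simp only [Multiset.coe_nil]
    abel

theorem pairSums_perm {l1 l2 : List Int} (h : l1.Perm l2) : (pairSums l1).Perm (pairSums l2) := by
  induction h with
  | nil => exact List.Perm.refl _
  | cons x h ih => simpa [pairSums] using (h.map _).append ih
  | swap x y l =>
    simp only [pairSums, List.map_cons, List.cons_append]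
    rw [← Multiset.coe_eq_coe]
    simp only [← Multiset.coe_add, ← Multiset.cons_coe, ← Multiset.singleton_add]
    rw [add_comm y x]
    abel
  | trans h1 h2 ih1 ih2 => exact ih1.trans ih2

theorem bsum_perm {l1 l2 : List Int} (h : l1.Perm l2) : bsum l1 = bsum l2 :=
  sup0_perm ((pairSums_perm h).map clip)

theorem bsum_small {l : List Int} (h : l.length < 2) : bsum l = 0 := by
  match l, h with
  | [], _ => rfl
  | [x], _ => rfl

-- A's nested index loops fold its update over pairSums of the remaining suffix
theorem loopA_aux (L : List Int) (k : Nat) :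
    ∀ (a : Nat), L.length - a = k → ∀ (ms : Int),
    (PySem.List.pyRange (a : Int) (PySem.List.len L) 1).foldl (fun ms i =>
      (PySem.List.pyRange (i + 1) (PySem.List.len L) 1).foldl (fun ms j =>
        if PySem.List.pyGetD L i 0 + PySem.List.pyGetD L j 0 ≤ 100
        then max ms (PySem.List.pyGetD L i 0 + PySem.List.pyGetD L j 0)
        else ms) ms) ms
    = (pairSums (L.drop a)).foldl (fun ms s => if s ≤ 100 then max ms s else ms) ms := by
  induction k with
  | zero =>
    intro a ha ms
    have hle : L.length ≤ a := by omega
    rw [PySem.List.pyRange_one_eq_nil (by simp; exact_mod_cast hle)]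
    rw [List.drop_eq_nil_of_le hle]
    rfl
  | succ k ih =>
    intro a ha ms
    have hlt : a < L.length := by omega
    rw [PySem.List.pyRange_one_cons (by simp; exact_mod_cast hlt)]
    rw [List.foldl_cons]
    have hdrop : L.drop a = L[a] :: L.drop (a + 1) := (List.getElem_cons_drop hlt).symm
    rw [hdrop]
    show _ = (List.foldl _ _ (List.map (fun e => L[a] + e) (L.drop (a+1)) ++ pairSums (L.drop (a+1))))
    rw [List.foldl_append]
    have hinner :
        (PySem.List.pyRange ((a : Int) + 1) (PySem.List.len L) 1).foldl (fun ms j =>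
          if PySem.List.pyGetD L (a : Int) 0 + PySem.List.pyGetD L j 0 ≤ 100
          then max ms (PySem.List.pyGetD L (a : Int) 0 + PySem.List.pyGetD L j 0)
          else ms) ms
        = (List.map (fun e => L[a] + e) (L.drop (a+1))).foldl
            (fun ms s => if s ≤ 100 then max ms s else ms) ms := by
      have hx : PySem.List.pyGetD L (a : Int) 0 = L[a] := PySem.List.pyGetD_ofNat L a 0 hlt
      have := PySem.List.foldl_pyRange_pyGetD (xs := L) (a := (a : Int) + 1) (d := 0)
        (f := fun ms e => if L[a] + e ≤ 100 then max ms (L[a] + e) else ms) (init := ms)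
        (by omega)
      simp only [hx]
      rw [this]
      have : ((a : Int) + 1).toNat = a + 1 := by omega
      rw [this, List.foldl_map]
    rw [hinner]
    exact ih (a + 1) (by omega) _

theorem foldl_gstep_eq (l : List Int) (ms : Int) (h : 0 ≤ ms) :
    l.foldl (fun ms s => if s ≤ 100 then max ms s else ms) ms = (l.map clip).foldl max ms := by
  induction l generalizing ms with
  | nil => rfl
  | cons s t ih =>
    simp only [List.foldl_cons, List.map_cons]
    have hstep : (if s ≤ 100 then max ms s else ms) = max ms (clip s) := by
      unfold clip; split_ifs <;> omega
    rw [hstep]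
    exact ih _ (le_trans h (le_max_left _ _))

theorem A_eq_bsum (nums : List Int) :
    max_pair_sum nums
      = bsum (PySem.List.sorted (nums.filter (fun num => decide (0 < num))) (fun x => x) true) := by
  unfold max_pair_sum
  set L := PySem.List.sorted (nums.filter (fun num => decide (0 < num))) (fun x => x) true with hL
  have h0 := loopA_aux L (L.length) 0 (by omega) 0
  simp only [Nat.cast_zero] at h0
  rw [h0, List.drop_zero, foldl_gstep_eq _ _ le_rfl]
  rfl

theorem take_tail' (l : List Int) (n : Nat) : (l.take n).tail = l.tail.take (n - 1) := by
  cases l <;> cases n <;> simp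

-- B's pointer loop equals tp on the segment [lo, hi]
theorem altGo_eq_tp (xs : List Int) (fuel : Nat) :
    ∀ (lo hi : Nat), hi < xs.length → hi - lo ≤ fuel → ∀ (best : Int),
    altGo xs fuel lo hi best = tp ((xs.drop lo).take (hi + 1 - lo)) best := by
  induction fuel with
  | zero =>
    intro lo hi hhi hf best
    have : ¬ lo < hi := by omega
    rw [altGo, tp, dif_neg (by simp [List.length_take, List.length_drop]; omega)]
  | succ fuel ih =>
    intro lo hi hhi hf best
    rw [altGo]
    by_cases hlh : lo < hi
    · rw [if_pos hlh]
      have hlo : lo < xs.length := by omega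
      have hseg : ((xs.drop lo).take (hi + 1 - lo)).length = hi + 1 - lo := by
        simp [List.length_take, List.length_drop]; omega
      rw [tp, dif_pos (by rw [hseg]; omega)]
      have hx : ((xs.drop lo).take (hi + 1 - lo)).getD 0 0 = PySem.List.pyGetD xs (lo : Int) 0 := by
        rw [PySem.List.pyGetD_ofNat xs lo 0 hlo]
        rw [List.getD_eq_getElem _ _ (by omega)]
        simp [List.getElem_take, List.getElem_drop]
      have hy : ((xs.drop lo).take (hi + 1 - lo)).getD (((xs.drop lo).take (hi + 1 - lo)).length - 1) 0
          = PySem.List.pyGetD xs (hi : Int) 0 := by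
        rw [PySem.List.pyGetD_ofNat xs hi 0 hhi]
        rw [hseg, List.getD_eq_getElem _ _ (by rw [hseg]; omega)]
        have : lo + (hi + 1 - lo - 1) = hi := by omega
        simp [List.getElem_take, List.getElem_drop, this]
      rw [hx, hy]
      by_cases hs : PySem.List.pyGetD xs (lo : Int) 0 + PySem.List.pyGetD xs (hi : Int) 0 ≤ 100
      · rw [if_pos hs, if_pos hs]
        rw [ih (lo + 1) hi hhi (by omega)]
        congr 1
        rw [take_tail', List.tail_drop]
        congr 1
      · rw [if_neg hs, if_neg hs]
        rw [ih lo (hi - 1) (by omega) (by omega)]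
        congr 1
        rw [List.dropLast_eq_take, hseg, List.take_take]
        congr 1
        omega
    · rw [if_neg hlh, tp, dif_neg (by simp [List.length_take, List.length_drop]; omega)]

-- last element of a ≤-sorted list is maximal
theorem le_getLast_of_sorted {l : List Int} (hs : l.Pairwise (· ≤ ·)) (hne : l ≠ [])
    {e : Int} (he : e ∈ l) : e ≤ l.getLast hne := by
  induction l with
  | nil => exact absurd rfl hne
  | cons x r ih =>
    cases r with
    | nil => simp at he; simp [he, List.getLast]
    | cons b t =>
      rw [List.getLast_cons (by simp)]
      rcases List.mem_cons.1 he with rfl | hmem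
      · exact le_trans (List.rel_of_pairwise_cons hs (List.getLast_mem _)) le_rfl
      · exact ih hs.of_cons (by simp) hmem

-- correctness of the two-pointer sweep on a sorted list of positives
theorem tp_eq_bsum (n : Nat) : ∀ (l : List Int), l.length ≤ n → l.Pairwise (· ≤ ·) →
    (∀ e ∈ l, 0 < e) → ∀ (best : Int), 0 ≤ best → tp l best = max best (bsum l) := by
  induction n with
  | zero =>
    intro l hn _ _ best hb
    have : l.length < 2 := by omega
    rw [tp, dif_neg (by omega), bsum_small this, max_eq_left hb]
  | succ n ih =>
    intro l hn hs hpos best hb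
    by_cases h2 : 2 ≤ l.length
    · obtain ⟨x, r, rfl⟩ : ∃ x r, l = x :: r := by
        cases l with
        | nil => simp at h2
        | cons a t => exact ⟨a, t, rfl⟩
      have hrne : r ≠ [] := by cases r <;> simp_all
      have hne : (x :: r) ≠ [] := by simp
      have hyval : (x :: r).getD ((x :: r).length - 1) 0 = (x :: r).getLast hne := by
        rw [List.getLast_eq_getElem, List.getD_eq_getElem _ _ (by simp)]
        rfl
      set y := (x :: r).getLast hne with hy
      have hylast : y = r.getLast hrne := by rw [hy, List.getLast_cons hrne]
      have hymem : y ∈ r := by rw [hylast]; exact List.getLast_mem _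
      have hxle : ∀ e ∈ r, x ≤ e := fun e he => List.rel_of_pairwise_cons hs he
      have hley : ∀ e ∈ r, e ≤ y := by
        intro e he
        rw [hylast]
        exact le_getLast_of_sorted hs.of_cons hrne he
      have hxpos : 0 < x := hpos x (by simp)
      have hypos : 0 < y := hpos y (by simp [hymem])
      rw [tp, dif_pos h2]
      simp only [List.getD_cons_zero, hyval]
      by_cases hsum : x + y ≤ 100
      · rw [if_pos hsum, List.tail_cons]
        rw [ih r (by simp only [List.length_cons] at hn; omega) hs.of_cons
          (fun e he => hpos e (by simp [he])) _ (le_trans hb (le_max_left _ _))]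
        have hbl : bsum (x :: r) = max (x + y) (bsum r) := by
          unfold bsum
          rw [show pairSums (x :: r) = r.map (fun e => x + e) ++ pairSums r from rfl,
            List.map_append, sup0_append]
          congr 1
          rw [List.map_map]
          have hmapeq : r.map (clip ∘ fun e => x + e) = r.map (fun e => x + e) := by
            apply List.map_congr_left
            intro e he
            have hey := hley e he
            simp only [Function.comp_apply, clip]
            rw [if_pos (by omega)]
          rw [hmapeq]
          exact sup0_eq_of_max (List.mem_map_of_mem hymem)
            (by intro v hv; obtain ⟨e, he, rfl⟩ := List.mem_map.1 hv
                have := hley e he; omega) (by omega)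
        rw [hbl, max_assoc]
      · rw [if_neg hsum]
        set d := (x :: r).dropLast with hd
        have hdl : d ++ [y] = x :: r := List.dropLast_concat_getLast hne
        have hdsub : ∀ e ∈ d, e ∈ x :: r := fun e he => by
          rw [← hdl]; exact List.mem_append_left _ he
        have hdlen : d.length = r.length := by rw [hd]; simp
        rw [ih d (by simp only [List.length_cons] at hn; omega)
          (hs.sublist (List.dropLast_sublist _)) (fun e he => hpos e (hdsub e he)) best hb]
        have hbl : bsum (x :: r) = bsum d := by
          unfold bsum
          rw [← hdl]
          have hperm := (pairSums_append_singleton d y).map clip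
          rw [sup0_perm hperm, List.map_append, sup0_append]
          have : sup0 ((d.map (fun e => e + y)).map clip) = 0 := by
            apply le_antisymm _ (sup0_nonneg _)
            apply sup0_le le_rfl
            intro v hv
            obtain ⟨w, hw, rfl⟩ := List.mem_map.1 hv
            obtain ⟨e, he, rfl⟩ := List.mem_map.1 hw
            have hxe : x ≤ e := by
              rcases List.mem_cons.1 (hdsub e he) with rfl | hm
              · exact le_rfl
              · exact hxle _ hm
            unfold clip
            rw [if_neg (by omega)]
          rw [this, max_eq_left (sup0_nonneg _)]
        rw [hbl]
    · rw [tp, dif_neg h2, bsum_small (by omega), max_eq_left hb]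

theorem B_eq_bsum (nums : List Int) :
    max_pair_sum_alt nums
      = bsum (PySem.List.sorted (nums.filter (fun n => decide (0 < n))) (fun x => x) false) := by
  unfold max_pair_sum_alt
  set xs := PySem.List.sorted (nums.filter (fun n => decide (0 < n))) (fun x => x) false with hxs
  show altGo xs xs.length 0 (xs.length - 1) 0 = bsum xs
  have hsorted : xs.Pairwise (· ≤ ·) := PySem.List.sorted_pairwise _ _
  have hpos : ∀ e ∈ xs, 0 < e := by
    intro e he
    rw [hxs, PySem.List.mem_sorted, List.mem_filter] at he
    simpa using he.2
  by_cases hnil : xs = []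
  · rw [hnil, bsum_small (by simp)]
    rfl
  · have hlen : 1 ≤ xs.length := by
      cases hc : xs with
      | nil => exact absurd hc hnil
      | cons a t => simp
    have h := altGo_eq_tp xs xs.length 0 (xs.length - 1) (by omega) (by omega) 0
    rw [h, List.drop_zero, show xs.length - 1 + 1 - 0 = xs.length from by omega,
      List.take_length]
    rw [tp_eq_bsum xs.length xs le_rfl hsorted hpos 0 le_rfl,
      max_eq_right (bsum_nonneg _)]

-- ===== VERDICT (by name: the statement is the Claim_ definition above) =====
theorem max_pair_sum_spec : Claim_equal_max_pair_sum := by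
  intro nums _
  show max_pair_sum nums = max_pair_sum_alt nums
  rw [A_eq_bsum, B_eq_bsum]
  exact bsum_perm ((PySem.List.sorted_perm _ _ _).trans (PySem.List.sorted_perm _ _ _).symm)
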